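-- pv_equiv track=rewrite | github.com/GreenHedgehog09/studentcapital | main.py | capital_calculation
-- ===== SOURCE A (Python) =====
-- def partition(first_numbers: list, second_numbers: list, begin: int, end: int):
--     # Right element as pivot
--     pivot = first_numbers[end]
--     i = begin - 1
--
--     for j in range(begin, end):
--         if first_numbers[j] >= pivot:
--             i += 1
--             (first_numbers[i], first_numbers[j]) = (first_numbers[j], first_numbers[i])
--             # Also for the second
--             (second_numbers[i], second_numbers[j]) = (second_numbers[j], second_numbers[i])
--
--     (first_numbers[i + 1], first_numbers[end]) = (first_numbers[end], first_numbers[i + 1])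
--     # Also for the second
--     (second_numbers[i + 1], second_numbers[end]) = (second_numbers[end], second_numbers[i + 1])
--
--     return i + 1
--
-- def quick_sort_by_first(first_numbers: list, second_numbers: list, begin: int, end: int):
--     if begin < end:
--         # Pivot  element: left elements - more, right elements - less.
--         pivot = partition(first_numbers, second_numbers, begin, end)
--
--         # Left side of pivot
--         quick_sort_by_first(first_numbers, second_numbers, begin, pivot - 1)
--
--         # Right side of pivot
--         quick_sort_by_first(first_numbers, second_numbers, pivot + 1, end)
--
-- def capital_calculation(limit: int, capital: int, gains: list, price: list) -> int:
--     # Sort descending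
--     quick_sort_by_first(gains, price, 0, len(gains) - 1)
--
--     profit = 0
--     # Calculation max profit
--     for gain, cost in zip(gains, price):
--         if limit > 0:
--             if capital >= cost and gain > cost:
--                 capital -= cost
--                 profit += gain
--                 limit -= 1
--             if not capital:
--                 break
--         else:
--             break
--
--     return capital + profit
-- ===== SOURCE B (Python) =====
-- def partition(first_numbers: list, second_numbers: list, begin: int, end: int):
--     pivot = first_numbers[end]
--     i = begin - 1
--     for j in range(begin, end):
--         if first_numbers[j] >= pivot:
--             i += 1
--             (first_numbers[i], first_numbers[j]) = (first_numbers[j], first_numbers[i])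
--             (second_numbers[i], second_numbers[j]) = (second_numbers[j], second_numbers[i])
--     (first_numbers[i + 1], first_numbers[end]) = (first_numbers[end], first_numbers[i + 1])
--     (second_numbers[i + 1], second_numbers[end]) = (second_numbers[end], second_numbers[i + 1])
--     return i + 1
--
-- def capital_calculation(limit: int, capital: int, gains: list, price: list) -> int:
--     # Iterative quicksort: explicit stack of (begin, end) ranges instead of recursion.
--     stack = [(0, len(gains) - 1)]
--     while stack:
--         begin, end = stack.pop()
--         if begin < end:
--             pivot = partition(gains, price, begin, end)
--             stack.append((pivot + 1, end))
--             stack.append((begin, pivot - 1))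
--
--     profit = 0
--     n = min(len(gains), len(price))
--     i = 0
--     while i < n and limit > 0:
--         gain = gains[i]
--         cost = price[i]
--         if capital >= cost and gain > cost:
--             capital -= cost
--             profit += gain
--             limit -= 1
--         if not capital:
--             break
--         i += 1
--
--     return capital + profit
-- ===== Notes on version B (the rewrite author's own statement) =====
-- stated objective: alternative
-- what changed: The recursive quick_sort_by_first is replaced by an iterative quicksort driven by an explicit stack of (begin, end) ranges (same partition, same in-place permutation), and the greedy zip-loop becomes an index-based while loop over the common prefix.
import Mathlib
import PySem

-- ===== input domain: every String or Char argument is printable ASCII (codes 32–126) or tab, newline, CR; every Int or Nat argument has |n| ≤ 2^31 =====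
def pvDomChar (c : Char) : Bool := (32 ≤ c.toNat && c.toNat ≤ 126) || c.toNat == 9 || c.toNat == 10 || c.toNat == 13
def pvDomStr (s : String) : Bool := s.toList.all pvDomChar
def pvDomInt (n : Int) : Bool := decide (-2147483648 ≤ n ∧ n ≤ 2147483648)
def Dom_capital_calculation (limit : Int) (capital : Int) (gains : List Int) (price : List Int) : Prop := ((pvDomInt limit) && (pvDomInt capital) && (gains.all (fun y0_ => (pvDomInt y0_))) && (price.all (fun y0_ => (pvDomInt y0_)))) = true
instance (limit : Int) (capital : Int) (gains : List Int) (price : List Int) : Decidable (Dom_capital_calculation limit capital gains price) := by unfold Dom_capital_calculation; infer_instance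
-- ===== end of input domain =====

-- B replaces A's recursive quicksort by an explicit-stack iterative quicksort (same partition, same
-- in-place permutation) and the zip-based greedy loop by an index-based while loop; objective: alternative
-- decomposition, same cost. Both A and B sort the caller's two lists in place in Python (identical
-- mutation); the equivalence proved here is about the return value.

-- Python tuple swap (xs[i], xs[j]) = (xs[j], xs[i]) — helper shared by both ports (identical in both Pythons)
def pySwap (xs : List Int) (i j : Int) : List Int :=
  PySem.List.pySetD (PySem.List.pySetD xs i (PySem.List.pyGetD xs j 0)) j (PySem.List.pyGetD xs i 0)

-- body of partition's `for j in range(begin, end)` loop; state = (first_numbers, second_numbers, i)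
def partStep (pivot : Int) (st : List Int × List Int × Int) (j : Int) : List Int × List Int × Int :=
  if PySem.List.pyGetD st.1 j 0 ≥ pivot then
    (pySwap st.1 (st.2.2 + 1) j, pySwap st.2.1 (st.2.2 + 1) j, st.2.2 + 1)
  else st

-- `partition` (helper of both A and B, identical Python): returns the two mutated lists and i + 1
def partitionPair (fs ss : List Int) (b e : Int) : List Int × List Int × Int :=
  let pivot := PySem.List.pyGetD fs e 0
  let st := (PySem.List.pyRange b e 1).foldl (partStep pivot) (fs, ss, b - 1)
  (pySwap st.1 (st.2.2 + 1) e, pySwap st.2.1 (st.2.2 + 1) e, st.2.2 + 1)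

-- termination helper for the ports: the returned pivot index lies in [b, e]
lemma foldl_partStep_bounds (pivot : Int) :
    ∀ (l : List Int) (st : List Int × List Int × Int),
      st.2.2 ≤ (l.foldl (partStep pivot) st).2.2 ∧
      (l.foldl (partStep pivot) st).2.2 ≤ st.2.2 + l.length := by
  intro l
  induction l with
  | nil => intro st; simp
  | cons a t ih =>
    intro st
    have hstep : (partStep pivot st a).2.2 = st.2.2 ∨ (partStep pivot st a).2.2 = st.2.2 + 1 := by
      unfold partStep; split <;> simp
    have := ih (partStep pivot st a)
    simp only [List.foldl_cons, List.length_cons] at *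
    omega

lemma partitionPair_idx_bounds (fs ss : List Int) (b e : Int) (h : b < e) :
    b ≤ (partitionPair fs ss b e).2.2 ∧ (partitionPair fs ss b e).2.2 ≤ e := by
  unfold partitionPair
  have hb := foldl_partStep_bounds (PySem.List.pyGetD fs e 0) (PySem.List.pyRange b e 1) (fs, ss, b - 1)
  have hl : ((PySem.List.pyRange b e 1).length : Int) = e - b := by
    rw [PySem.List.length_pyRange_one]; omega
  simp only at *
  omega

-- ===== PORT A =====
-- `quick_sort_by_first`: literal recursive quicksort of A
def quick_sort (fs ss : List Int) (b e : Int) : List Int × List Int :=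
  if h : b < e then
    let r := partitionPair fs ss b e
    let q := quick_sort r.1 r.2.1 b (r.2.2 - 1)
    quick_sort q.1 q.2 (r.2.2 + 1) e
  else (fs, ss)
termination_by (e - b).toNat
decreasing_by
  · have := partitionPair_idx_bounds fs ss b e h; omega
  · have := partitionPair_idx_bounds fs ss b e h; omega

-- A's `for gain, cost in zip(gains, price)` greedy loop
def greedy_loop (pairs : List (Int × Int)) (limit capital profit : Int) : Int :=
  match pairs with
  | [] => capital + profit
  | (gain, cost) :: rest =>
    if 0 < limit then
      let s := if capital ≥ cost ∧ gain > cost then (capital - cost, profit + gain, limit - 1)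
               else (capital, profit, limit)
      if s.1 = 0 then s.1 + s.2.1 else greedy_loop rest s.2.2 s.1 s.2.1
    else capital + profit

def capital_calculation (limit : Int) (capital : Int) (gains : List Int) (price : List Int) : Int :=
  let q := quick_sort gains price 0 (PySem.List.len gains - 1)
  greedy_loop (q.1.zip q.2) limit capital 0

-- ===== PORT B =====
-- weight of a stack entry, measure for the iterative quicksort's while loop
def rangeWt (pr : Int × Int) : Nat := if pr.1 < pr.2 then 2 * (pr.2 - pr.1).toNat + 1 else 1

-- B's `while stack:` loop: pop a range, partition, push right then left subrange
def qs_loop (fs ss : List Int) (stack : List (Int × Int)) : List Int × List Int :=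
  match stack with
  | [] => (fs, ss)
  | (b, e) :: rest =>
    if h : b < e then
      let r := partitionPair fs ss b e
      qs_loop r.1 r.2.1 ((b, r.2.2 - 1) :: (r.2.2 + 1, e) :: rest)
    else qs_loop fs ss rest
termination_by (stack.map rangeWt).sum
decreasing_by
  · have := partitionPair_idx_bounds fs ss b e h
    simp only [List.map_cons, List.sum_cons, rangeWt]
    split_ifs <;> omega
  · simp only [List.map_cons, List.sum_cons, rangeWt]
    split_ifs <;> omega

-- B's `while i < n and limit > 0:` greedy loop over indices
def greedy_while (gains price : List Int) (n limit capital profit i : Int) : Int :=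
  if h : i < n ∧ 0 < limit then
    let gain := PySem.List.pyGetD gains i 0
    let cost := PySem.List.pyGetD price i 0
    let s := if capital ≥ cost ∧ gain > cost then (capital - cost, profit + gain, limit - 1)
             else (capital, profit, limit)
    if s.1 = 0 then s.1 + s.2.1
    else greedy_while gains price n s.2.2 s.1 s.2.1 (i + 1)
  else capital + profit
termination_by (n - i).toNat
decreasing_by omega

def capital_calculation_alt (limit : Int) (capital : Int) (gains : List Int) (price : List Int) : Int :=
  let q := qs_loop gains price [(0, PySem.List.len gains - 1)]
  greedy_while q.1 q.2 (min (PySem.List.len q.1) (PySem.List.len q.2)) limit capital 0 0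

-- ===== PRECONDITION & SPEC =====
-- Pre_ excludes exactly the inputs on which A raises IndexError: price shorter than gains (with at
-- least 2 gains), where partition's swap on second_numbers reads past the end of price.
def Pre_capital_calculation (limit : Int) (capital : Int) (gains : List Int) (price : List Int) : Prop :=
  gains.length ≤ 1 ∨ gains.length ≤ price.length
instance (limit : Int) (capital : Int) (gains : List Int) (price : List Int) : Decidable (Pre_capital_calculation limit capital gains price) := by unfold Pre_capital_calculation; infer_instance

def pvWitness_capital_calculation : Int × Int × List Int × List Int := (0, 0, [], [])

def Spec_capital_calculation (limit : Int) (capital : Int) (gains : List Int) (price : List Int) (out : Int) : Prop := out = capital_calculation_alt limit capital gains price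
instance (limit : Int) (capital : Int) (gains : List Int) (price : List Int) (out : Int) : Decidable (Spec_capital_calculation limit capital gains price out) := by unfold Spec_capital_calculation; infer_instance

-- ===== CLAIM (what is proved, stated in full; the proofs are below) =====
def Claim_equal_capital_calculation : Prop := ∀ (limit : Int) (capital : Int) (gains : List Int) (price : List Int), Dom_capital_calculation limit capital gains price → Pre_capital_calculation limit capital gains price → Spec_capital_calculation limit capital gains price (capital_calculation limit capital gains price)

-- ===== LEMMAS AND PROOFS =====

-- the stack machine run on (b, e) :: rest first computes quick_sort on [b, e], then processes rest
lemma qs_loop_eq_quick_sort :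
    ∀ (k : Nat) (fs ss : List Int) (b e : Int), (e - b).toNat ≤ k →
      ∀ rest, qs_loop fs ss ((b, e) :: rest)
        = qs_loop (quick_sort fs ss b e).1 (quick_sort fs ss b e).2 rest := by
  intro k
  induction k with
  | zero =>
    intro fs ss b e hk rest
    have hbe : ¬ b < e := by omega
    rw [qs_loop, quick_sort]
    simp [hbe]
  | succ k ih =>
    intro fs ss b e hk rest
    by_cases hbe : b < e
    · have hp := partitionPair_idx_bounds fs ss b e hbe
      rw [qs_loop, dif_pos hbe]
      simp only []
      rw [ih (partitionPair fs ss b e).1 (partitionPair fs ss b e).2.1 b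
            ((partitionPair fs ss b e).2.2 - 1) (by omega)
            (((partitionPair fs ss b e).2.2 + 1, e) :: rest)]
      rw [ih (quick_sort (partitionPair fs ss b e).1 (partitionPair fs ss b e).2.1 b
              ((partitionPair fs ss b e).2.2 - 1)).1
            (quick_sort (partitionPair fs ss b e).1 (partitionPair fs ss b e).2.1 b
              ((partitionPair fs ss b e).2.2 - 1)).2
            ((partitionPair fs ss b e).2.2 + 1) e (by omega) rest]
      conv_rhs => rw [quick_sort]
      rw [dif_pos hbe]
    · rw [qs_loop, quick_sort]
      simp [hbe]

lemma qs_loop_single (fs ss : List Int) (b e : Int) :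
    qs_loop fs ss [(b, e)] = quick_sort fs ss b e := by
  rw [qs_loop_eq_quick_sort (e - b).toNat fs ss b e le_rfl []]
  rw [qs_loop]

-- the index-based while loop computes A's zip-based loop on the remaining pairs
lemma greedy_while_eq_greedy_loop :
    ∀ (k : Nat) (gains price : List Int) (limit capital profit i : Int), 0 ≤ i →
      ((min (PySem.List.len gains) (PySem.List.len price)) - i).toNat ≤ k →
      greedy_while gains price (min (PySem.List.len gains) (PySem.List.len price)) limit capital profit i
        = greedy_loop ((gains.zip price).drop i.toNat) limit capital profit := by
  intro k
  induction k with
  | zero =>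
    intro gains price limit capital profit i hi hk
    simp only [PySem.List.len_eq] at hk
    have hn : ¬ (i < min (PySem.List.len gains) (PySem.List.len price) ∧ 0 < limit) := by
      rintro ⟨h1, -⟩
      simp only [PySem.List.len_eq] at h1
      omega
    have hdrop : (gains.zip price).drop i.toNat = [] := by
      apply List.drop_eq_nil_of_le
      simp only [List.length_zip]
      omega
    rw [greedy_while, dif_neg hn, hdrop, greedy_loop]
  | succ k ih =>
    intro gains price limit capital profit i hi hk
    simp only [PySem.List.len_eq] at hk
    by_cases hcond : i < min (PySem.List.len gains) (PySem.List.len price) ∧ 0 < limit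
    · obtain ⟨hin, hlim⟩ := hcond
      have hin' : i < min ((gains.length : Int)) ((price.length : Int)) := by
        simpa [PySem.List.len_eq] using hin
      have hzlen : i.toNat < (gains.zip price).length := by
        simp only [List.length_zip]; omega
      have hg : PySem.List.pyGetD gains i 0 = gains[i.toNat] :=
        PySem.List.pyGetD_eq_getElem gains 0 hi (by omega)
      have hp2 : PySem.List.pyGetD price i 0 = price[i.toNat] :=
        PySem.List.pyGetD_eq_getElem price 0 hi (by omega)
      rw [greedy_while, dif_pos ⟨hin, hlim⟩]
      simp only []
      rw [List.drop_eq_getElem_cons hzlen, List.getElem_zip, greedy_loop, hg, hp2, if_pos hlim]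
      by_cases hs : (if capital ≥ price[i.toNat] ∧ gains[i.toNat] > price[i.toNat]
          then (capital - price[i.toNat], profit + gains[i.toNat], limit - 1)
          else (capital, profit, limit)).1 = 0
      · simp only [if_pos hs]
      · rw [if_neg hs]
        have h1 : (i + 1).toNat = i.toNat + 1 := by omega
        rw [ih gains price _ _ _ (i + 1) (by omega)
              (by simp only [PySem.List.len_eq]; omega), h1]
        simp only [if_neg hs]
    · have hx : ¬ (i < min ((gains.length : Int)) ((price.length : Int)) ∧ 0 < limit) := by
        simpa [PySem.List.len_eq] using hcond
      rw [greedy_while, dif_neg hcond]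
      by_cases hin : i < min ((gains.length : Int)) ((price.length : Int))
      · have hlim : ¬ 0 < limit := by tauto
        have hzlen : i.toNat < (gains.zip price).length := by
          simp only [List.length_zip]; omega
        rw [List.drop_eq_getElem_cons hzlen, List.getElem_zip, greedy_loop, if_neg hlim]
      · have hdrop : (gains.zip price).drop i.toNat = [] := by
          apply List.drop_eq_nil_of_le
          simp only [List.length_zip]; omega
        rw [hdrop, greedy_loop]

-- ===== VERDICT (by name: the statement is the Claim_ definition above) =====
theorem capital_calculation_spec : Claim_equal_capital_calculation := by
  unfold Claim_equal_capital_calculation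
  intro limit capital gains price _ _
  unfold Spec_capital_calculation capital_calculation capital_calculation_alt
  simp only []
  rw [qs_loop_single]
  have h := greedy_while_eq_greedy_loop
      (((min (PySem.List.len (quick_sort gains price 0 (PySem.List.len gains - 1)).1)
          (PySem.List.len (quick_sort gains price 0 (PySem.List.len gains - 1)).2)) - 0).toNat)
      (quick_sort gains price 0 (PySem.List.len gains - 1)).1
      (quick_sort gains price 0 (PySem.List.len gains - 1)).2
      limit capital 0 0 le_rfl le_rfl
  rw [h]
  simp
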